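-- pv_equiv track=rewrite | github.com/ar90n/lab | contest/atcoder/abc130/E/main.py | solve
-- ===== SOURCE A (Python) =====
-- MOD = 1000000007  # type: int
--
-- def solve(N: int, M: int, S: "List[int]", T: "List[int]"):
--     dp = [[0] * (M + 1) for _ in range(N + 1)]
--
--     for i in range(N):
--         for j in range(M):
--             dp[i + 1][j + 1] = (dp[i+1][j] + dp[i][j+1] - dp[i][j]) % MOD
--             if S[i] == T[j]:
--                 dp[i+1][j+1] += dp[i][j] + 1
--             dp[i+1][j+1] %= MOD
--     return (dp[-1][-1] + 1) % MOD
-- ===== SOURCE B (Python) =====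
-- MOD = 1000000007
--
--
-- def solve(N: int, M: int, S: "List[int]", T: "List[int]"):
--     # DP anchored on the LAST matched pair: ec = 1 + (number of common
--     # subsequence pairs strictly above-left), obtained from per-column
--     # cumulative sums; only O(M) state instead of the full 2D table.
--     colsum = [0] * M          # colsum[j] = sum of ec over rows < i at column j (mod MOD)
--     total = 0                 # sum of all ec values so far (mod MOD)
--     for i in range(N):
--         running = 0           # sum of colsum[0:j] (mod MOD) = pairs strictly above-left
--         row_ec = [0] * M
--         for j in range(M):
--             if S[i] == T[j]:
--                 ec = (running + 1) % MOD
--                 row_ec[j] = ec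
--                 total = (total + ec) % MOD
--             running = (running + colsum[j]) % MOD
--         for j in range(M):
--             colsum[j] = (colsum[j] + row_ec[j]) % MOD
--     return (total + 1) % MOD
-- ===== Notes on version B (the rewrite author's own statement) =====
-- stated objective: alternative
-- what changed: Replaces the full (N+1)x(M+1) inclusion-exclusion dp table (with subtraction) by a match-anchored DP: ec = 1 + pairs strictly above-left, computed from a 1D per-column cumulative-sum array plus a running row prefix, keeping only O(M) state and a grand total, additions only.
import Mathlib
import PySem

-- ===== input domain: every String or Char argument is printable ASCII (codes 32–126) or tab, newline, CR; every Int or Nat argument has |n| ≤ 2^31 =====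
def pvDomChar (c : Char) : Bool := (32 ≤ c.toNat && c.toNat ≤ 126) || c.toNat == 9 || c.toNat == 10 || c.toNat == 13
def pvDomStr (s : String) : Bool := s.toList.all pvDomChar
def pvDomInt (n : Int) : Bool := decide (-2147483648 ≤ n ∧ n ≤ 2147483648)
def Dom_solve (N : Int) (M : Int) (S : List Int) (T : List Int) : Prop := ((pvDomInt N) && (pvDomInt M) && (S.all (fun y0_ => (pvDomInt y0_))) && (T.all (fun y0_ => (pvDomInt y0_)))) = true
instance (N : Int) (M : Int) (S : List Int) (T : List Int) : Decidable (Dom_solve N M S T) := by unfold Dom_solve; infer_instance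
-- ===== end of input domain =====

-- B replaces A's full (N+1)×(M+1) inclusion-exclusion dp table by a match-anchored DP
-- (ec = 1 + pairs strictly above-left) kept in a 1D per-column cumulative array plus a
-- running row prefix and a grand total — O(M) state, additions only (objective: alternative).

def MODC : Int := 1000000007

-- ===== PORT A =====
def solveStep (S T : List Int) (dp : List (List Int)) (i j : Int) : List (List Int) :=
  let row_i := PySem.List.pyGetD dp i []
  let row_i1 := PySem.List.pyGetD dp (i + 1) []
  let v1 := PySem.Int.mod
      (PySem.List.pyGetD row_i1 j 0 + PySem.List.pyGetD row_i (j + 1) 0 - PySem.List.pyGetD row_i j 0) MODC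
  let v2 := if PySem.List.pyGetD S i 0 = PySem.List.pyGetD T j 0 then v1 + PySem.List.pyGetD row_i j 0 + 1 else v1
  let v3 := PySem.Int.mod v2 MODC
  PySem.List.pySetD dp (i + 1) (PySem.List.pySetD row_i1 (j + 1) v3)

def solve (N : Int) (M : Int) (S : List Int) (T : List Int) : Int :=
  let dp0 := (PySem.List.pyRange 0 (N + 1) 1).map (fun _ => PySem.List.pyRepeat [(0 : Int)] (M + 1))
  let dp := (PySem.List.pyRange 0 N 1).foldl
    (fun dp i => (PySem.List.pyRange 0 M 1).foldl (fun dp j => solveStep S T dp i j) dp) dp0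
  PySem.Int.mod (PySem.List.pyGetD (PySem.List.pyGetD dp (-1) []) (-1) 0 + 1) MODC

-- ===== PORT B =====
def altInner (S T colsum : List Int) (i : Int) (st : Int × List Int × Int) (j : Int) : Int × List Int × Int :=
  let running := st.1
  let rowEc := st.2.1
  let total := st.2.2
  if PySem.List.pyGetD S i 0 = PySem.List.pyGetD T j 0 then
    let ec := PySem.Int.mod (running + 1) MODC
    (PySem.Int.mod (running + PySem.List.pyGetD colsum j 0) MODC,
     PySem.List.pySetD rowEc j ec,
     PySem.Int.mod (total + ec) MODC)
  else
    (PySem.Int.mod (running + PySem.List.pyGetD colsum j 0) MODC, rowEc, total)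

def altRow (S T : List Int) (M : Int) (st : List Int × Int) (i : Int) : List Int × Int :=
  let r := (PySem.List.pyRange 0 M 1).foldl (altInner S T st.1 i) (0, PySem.List.pyRepeat [(0 : Int)] M, st.2)
  ((PySem.List.pyRange 0 M 1).foldl
      (fun cs j => PySem.List.pySetD cs j
        (PySem.Int.mod (PySem.List.pyGetD cs j 0 + PySem.List.pyGetD r.2.1 j 0) MODC)) st.1,
   r.2.2)

def solve_alt (N : Int) (M : Int) (S : List Int) (T : List Int) : Int :=
  let st := (PySem.List.pyRange 0 N 1).foldl (altRow S T M) (PySem.List.pyRepeat [(0 : Int)] M, 0)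
  PySem.Int.mod (st.2 + 1) MODC

-- ===== PRECONDITION & SPEC =====
-- Exactly where A returns: N,M ≥ 0 (else dp[-1][-1] is an IndexError) and, when both loops
-- actually run (N > 0 and M > 0), S and T long enough for S[i] / T[j].
def Pre_solve (N : Int) (M : Int) (S : List Int) (T : List Int) : Prop :=
  0 ≤ N ∧ 0 ≤ M ∧ (N = 0 ∨ M = 0 ∨ (N ≤ S.length ∧ M ≤ T.length))
instance (N : Int) (M : Int) (S : List Int) (T : List Int) : Decidable (Pre_solve N M S T) := by
  unfold Pre_solve; infer_instance

def pvWitness_solve : Int × Int × List Int × List Int := (2, 2, [1, 2], [2, 1])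

def Spec_solve (N : Int) (M : Int) (S : List Int) (T : List Int) (out : Int) : Prop := out = solve_alt N M S T
instance (N : Int) (M : Int) (S : List Int) (T : List Int) (out : Int) : Decidable (Spec_solve N M S T out) := by
  unfold Spec_solve; infer_instance

-- ===== CLAIM (what is proved, stated in full; the proofs are below) =====
def Claim_equal_solve : Prop := ∀ (N : Int) (M : Int) (S : List Int) (T : List Int),
  Dom_solve N M S T → Pre_solve N M S T → Spec_solve N M S T (solve N M S T)

-- ===== LEMMAS AND PROOFS =====

-- The exact common-subsequence-pair count (no modulus), by A's inclusion–exclusion recurrence.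
def Cfun (S T : List Int) : Nat → Nat → Int
  | 0, _ => 0
  | _ + 1, 0 => 0
  | i + 1, j + 1 =>
      Cfun S T (i + 1) j + Cfun S T i (j + 1) - Cfun S T i j +
        (if S.getD i 0 = T.getD j 0 then Cfun S T i j + 1 else 0)
termination_by i j => (i, j)

-- number of common subsequence pairs whose LAST matched letters are S[i] == T[j]
def ecT (S T : List Int) (i j : Nat) : Int :=
  if S.getD i 0 = T.getD j 0 then Cfun S T i j + 1 else 0

lemma Cfun_zero_left (S T : List Int) (j : Nat) : Cfun S T 0 j = 0 := by simp [Cfun]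

lemma Cfun_zero_right (S T : List Int) (i : Nat) : Cfun S T i 0 = 0 := by
  cases i <;> simp [Cfun]

lemma Cfun_succ_succ (S T : List Int) (i j : Nat) :
    Cfun S T (i + 1) (j + 1) =
      Cfun S T (i + 1) j + Cfun S T i (j + 1) - Cfun S T i j + ecT S T i j := by
  rw [Cfun, ecT]

lemma Cfun_row (S T : List Int) (i : Nat) : ∀ j : Nat,
    Cfun S T (i + 1) j = Cfun S T i j + ((List.range j).map (ecT S T i)).sum
  | 0 => by simp [Cfun_zero_right]
  | j + 1 => by
    rw [Cfun_succ_succ, Cfun_row S T i j, List.range_succ]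
    simp; ring

lemma Cfun_col (S T : List Int) (j : Nat) : ∀ i : Nat,
    Cfun S T i (j + 1) = Cfun S T i j + ((List.range i).map (fun i' => ecT S T i' j)).sum
  | 0 => by simp [Cfun_zero_left]
  | i + 1 => by
    rw [Cfun_succ_succ, Cfun_col S T j i, List.range_succ]
    simp; ring

-- generic: setting one slot of a tabulated list
lemma set_map_range {β : Type} (k x : Nat) (f : Nat → β) (v : β) :
    ((List.range k).map f).set x v = (List.range k).map (fun y => if y = x then v else f y) := by
  apply List.ext_getElem
  · simp
  · intro i hi hi2
    rw [List.getElem_set]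
    simp only [List.getElem_map, List.getElem_range]
    split_ifs with h1 h2 h2 <;> first | rfl | omega

-- ===== A side =====
def Dv (S T : List Int) (r c : Nat) : Int := Cfun S T r c % 1000000007

def cellA (S T : List Int) (i j r c : Nat) : Int :=
  if r = 0 ∨ c = 0 ∨ r ≤ i ∨ (r = i + 1 ∧ c ≤ j) then Dv S T r c else 0

def tableA (S T : List Int) (n m i j : Nat) : List (List Int) :=
  (List.range (n + 1)).map (fun r => (List.range (m + 1)).map (fun c => cellA S T i j r c))

lemma Dv_zero_left (S T : List Int) (c : Nat) : Dv S T 0 c = 0 := by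
  simp [Dv, Cfun_zero_left]

lemma Dv_zero_right (S T : List Int) (r : Nat) : Dv S T r 0 = 0 := by
  simp [Dv, Cfun_zero_right]

lemma cellA_init (S T : List Int) (r c : Nat) : cellA S T 0 0 r c = 0 := by
  unfold cellA
  split_ifs with h
  · rcases h with h | h | h | h
    · subst h; exact Dv_zero_left S T c
    · subst h; exact Dv_zero_right S T r
    · interval_cases r; exact Dv_zero_left S T c
    · obtain ⟨-, hc⟩ := h; interval_cases c; exact Dv_zero_right S T r
  · rfl

lemma tableA_init (S T : List Int) (n m : Nat) :
    tableA S T n m 0 0 = List.replicate (n + 1) (List.replicate (m + 1) (0 : Int)) := by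
  unfold tableA
  have hrow : ∀ r, (List.range (m + 1)).map (fun c => cellA S T 0 0 r c) = List.replicate (m + 1) (0 : Int) := by
    intro r
    apply List.ext_getElem <;> simp [cellA_init]
  calc (List.range (n + 1)).map (fun r => (List.range (m + 1)).map (fun c => cellA S T 0 0 r c))
      = (List.range (n + 1)).map (fun _ => List.replicate (m + 1) (0 : Int)) := by
        exact List.map_congr_left (fun r _ => hrow r)
    _ = List.replicate (n + 1) (List.replicate (m + 1) (0 : Int)) := by
        rw [List.map_const']; simp

lemma cellA_eq_Dv (S T : List Int) (i j r c : Nat)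
    (h : r = 0 ∨ c = 0 ∨ r ≤ i ∨ (r = i + 1 ∧ c ≤ j)) : cellA S T i j r c = Dv S T r c :=
  if_pos h

lemma modc_eq (x : Int) : PySem.Int.mod x MODC = x % 1000000007 :=
  PySem.Int.mod_eq_emod_of_pos (by decide)

lemma Dv_step (S T : List Int) (i j : Nat) :
    PySem.Int.mod (if S.getD i 0 = T.getD j 0 then
        PySem.Int.mod (Dv S T (i + 1) j + Dv S T i (j + 1) - Dv S T i j) MODC + Dv S T i j + 1
      else PySem.Int.mod (Dv S T (i + 1) j + Dv S T i (j + 1) - Dv S T i j) MODC) MODC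
      = Dv S T (i + 1) (j + 1) := by
  unfold Dv
  rw [Cfun_succ_succ, ecT]
  by_cases h : S.getD i 0 = T.getD j 0
  · rw [if_pos h, if_pos h]
    simp only [modc_eq]
    generalize Cfun S T (i + 1) j = a
    generalize Cfun S T i (j + 1) = b
    generalize Cfun S T i j = c
    omega
  · rw [if_neg h, if_neg h]
    simp only [modc_eq]
    generalize Cfun S T (i + 1) j = a
    generalize Cfun S T i (j + 1) = b
    generalize Cfun S T i j = c
    omega

lemma rowA_read (S T : List Int) (n m i j r : Nat) (hr : r < n + 1) :
    PySem.List.pyGetD (tableA S T n m i j) ((r : Nat) : Int) []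
      = (List.range (m + 1)).map (fun c => cellA S T i j r c) := by
  unfold tableA
  rw [PySem.List.pyGetD_natCast, PySem.List.getD_map_range _ _ _ _ hr]

lemma cellA_read (S T : List Int) (m i j r c : Nat) (hc : c < m + 1) :
    PySem.List.pyGetD ((List.range (m + 1)).map (fun c => cellA S T i j r c)) ((c : Nat) : Int) 0
      = cellA S T i j r c := by
  rw [PySem.List.pyGetD_natCast, PySem.List.getD_map_range _ _ _ _ hc]

lemma stepA (S T : List Int) (n m i j : Nat) (hi : i < n) (hj : j < m) :
    solveStep S T (tableA S T n m i j) (↑i) (↑j) = tableA S T n m i (j + 1) := by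
  have e1 : ((i : Nat) : Int) + 1 = (((i + 1 : Nat) : Nat) : Int) := by push_cast; ring
  have e2 : ((j : Nat) : Int) + 1 = (((j + 1 : Nat) : Nat) : Int) := by push_cast; ring
  simp only [solveStep, e1, e2]
  rw [rowA_read S T n m i j (i + 1) (by omega), rowA_read S T n m i j i (by omega),
      cellA_read S T m i j (i + 1) j (by omega), cellA_read S T m i j i (j + 1) (by omega),
      cellA_read S T m i j i j (by omega)]
  rw [cellA_eq_Dv S T i j (i + 1) j (by omega), cellA_eq_Dv S T i j i (j + 1) (by omega),
      cellA_eq_Dv S T i j i j (by omega)]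
  simp only [PySem.List.pyGetD_natCast, PySem.List.pySetD_natCast]
  rw [set_map_range, Dv_step S T i j]
  unfold tableA
  rw [set_map_range]
  apply List.map_congr_left
  intro r hr
  simp only [List.mem_range] at hr
  by_cases hri : r = i + 1
  · subst hri
    rw [if_pos rfl]
    apply List.map_congr_left
    intro c hc
    simp only [List.mem_range] at hc
    by_cases hcj : c = j + 1
    · subst hcj
      rw [if_pos rfl, cellA_eq_Dv S T i (j + 1) (i + 1) (j + 1) (by omega)]
    · rw [if_neg hcj]
      unfold cellA
      by_cases hcle : c ≤ j
      · rw [if_pos (by omega), if_pos (by omega)]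
      · rw [if_neg (by omega), if_neg (by omega)]
  · rw [if_neg hri]
    apply List.map_congr_left
    intro c hc
    unfold cellA
    by_cases hcond : r = 0 ∨ c = 0 ∨ r ≤ i
    · rw [if_pos (by omega), if_pos (by omega)]
    · rw [if_neg (by omega), if_neg (by omega)]

lemma innerA (S T : List Int) (n m i : Nat) (hi : i < n) : ∀ j, j ≤ m →
    (PySem.List.pyRange 0 (↑j) 1).foldl (fun dp jj => solveStep S T dp (↑i) jj) (tableA S T n m i 0)
      = tableA S T n m i j := by
  intro j
  induction j with
  | zero => intro _; rw [PySem.List.pyRange_one_eq_nil (by omega)]; rfl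
  | succ j ih =>
    intro hj
    have e2 : (((j + 1 : Nat) : Nat) : Int) = ((j : Nat) : Int) + 1 := by push_cast; ring
    rw [e2, PySem.List.pyRange_one_succ_right (by positivity), List.foldl_append,
        ih (by omega)]
    simpa using stepA S T n m i j hi (by omega)

lemma rowTransA (S T : List Int) (n m i : Nat) :
    tableA S T n m i m = tableA S T n m (i + 1) 0 := by
  unfold tableA
  apply List.map_congr_left
  intro r hr
  apply List.map_congr_left
  intro c hc
  simp only [List.mem_range] at hc
  unfold cellA
  by_cases hcond : r = 0 ∨ c = 0 ∨ r ≤ i + 1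
  · rw [if_pos (by omega), if_pos (by omega)]
  · rw [if_neg (by omega), if_neg (by omega)]

lemma outerA (S T : List Int) (n m : Nat) : ∀ i, i ≤ n →
    (PySem.List.pyRange 0 (↑i) 1).foldl
        (fun dp ii => (PySem.List.pyRange 0 (↑m) 1).foldl (fun dp jj => solveStep S T dp ii jj) dp)
        (tableA S T n m 0 0)
      = tableA S T n m i 0 := by
  intro i
  induction i with
  | zero =>
    intro _
    rw [show PySem.List.pyRange 0 (((0 : Nat) : Nat) : Int) 1 = [] from
      PySem.List.pyRange_one_eq_nil (by omega)]
    rfl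
  | succ i ih =>
    intro hi
    have e1 : (((i + 1 : Nat) : Nat) : Int) = ((i : Nat) : Int) + 1 := by push_cast; ring
    rw [e1, PySem.List.pyRange_one_succ_right (by positivity), List.foldl_append,
        ih (by omega)]
    simp only [List.foldl_cons, List.foldl_nil]
    rw [innerA S T n m i (by omega) m (le_refl m), rowTransA]

lemma last_map_range {β : Type} (k : Nat) (f : Nat → β) (d : β) :
    PySem.List.pyGetD ((List.range (k + 1)).map f) (-1) d = f k := by
  rw [List.range_succ, List.map_append]
  exact PySem.List.pyGetD_neg_one_append_singleton _ _ _

lemma solveA_eq (S T : List Int) (n m : Nat) :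
    solve (↑n) (↑m) S T = (Cfun S T n m % 1000000007 + 1) % 1000000007 := by
  have e1 : ((n : Nat) : Int) + 1 = (((n + 1 : Nat) : Nat) : Int) := by push_cast; ring
  have e2 : ((m : Nat) : Int) + 1 = (((m + 1 : Nat) : Nat) : Int) := by push_cast; ring
  simp only [solve, e1, e2]
  have hdp0 : (PySem.List.pyRange 0 (((n + 1 : Nat) : Int)) 1).map
      (fun _ => PySem.List.pyRepeat [(0 : Int)] (((m + 1 : Nat) : Int))) = tableA S T n m 0 0 := by
    rw [tableA_init, PySem.List.pyRepeat_singleton, List.map_const']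
    simp [PySem.List.length_pyRange_one]
  rw [hdp0, outerA S T n m n (le_refl n)]
  have hlast : PySem.List.pyGetD (tableA S T n m n 0) (-1) []
      = (List.range (m + 1)).map (fun c => cellA S T n 0 n c) := by
    unfold tableA
    exact last_map_range n _ []
  rw [hlast, last_map_range m _ 0, cellA_eq_Dv S T n 0 n m (by omega), modc_eq]
  unfold Dv
  rfl

-- ===== B side =====
def colS (S T : List Int) (i j : Nat) : Int := ((List.range i).map (fun i' => ecT S T i' j)).sum

def csL (S T : List Int) (m i : Nat) : List Int :=
  (List.range m).map (fun j => colS S T i j % 1000000007)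

def rowEcL (S T : List Int) (m i j : Nat) : List Int :=
  (List.range m).map (fun j' => if j' < j then ecT S T i j' % 1000000007 else 0)

def pTot (S T : List Int) (m i j : Nat) : Int :=
  Cfun S T i m + ((List.range j).map (ecT S T i)).sum

lemma colS_succ (S T : List Int) (i j : Nat) :
    colS S T (i + 1) j = colS S T i j + ecT S T i j := by
  unfold colS; rw [List.range_succ]; simp

lemma pTot_succ (S T : List Int) (m i j : Nat) :
    pTot S T m i (j + 1) = pTot S T m i j + ecT S T i j := by
  unfold pTot; rw [List.range_succ]; simp; ring

lemma rowEcL_zero (S T : List Int) (m i : Nat) :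
    rowEcL S T m i 0 = List.replicate m 0 := by
  apply List.ext_getElem <;> simp [rowEcL]

lemma csL_zero (S T : List Int) (m : Nat) :
    csL S T m 0 = List.replicate m 0 := by
  apply List.ext_getElem <;> simp [csL, colS]

lemma innerB (S T : List Int) (m i : Nat) : ∀ j, j ≤ m →
    (PySem.List.pyRange 0 (↑j) 1).foldl (altInner S T (csL S T m i) (↑i))
        (0, rowEcL S T m i 0, Cfun S T i m % 1000000007)
      = (Cfun S T i j % 1000000007, rowEcL S T m i j, pTot S T m i j % 1000000007) := by
  intro j
  induction j with
  | zero =>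
    intro _
    rw [show PySem.List.pyRange 0 (((0 : Nat) : Nat) : Int) 1 = [] from
      PySem.List.pyRange_one_eq_nil (by omega)]
    simp only [List.foldl_nil]
    rw [Cfun_zero_right]
    unfold pTot
    simp
  | succ j ih =>
    intro hj
    have e2 : (((j + 1 : Nat) : Nat) : Int) = ((j : Nat) : Int) + 1 := by push_cast; ring
    rw [e2, PySem.List.pyRange_one_succ_right (by positivity), List.foldl_append, ih (by omega)]
    simp only [List.foldl_cons, List.foldl_nil]
    unfold altInner
    simp only [PySem.List.pyGetD_natCast]
    have hcs : (csL S T m i).getD j 0 = colS S T i j % 1000000007 := by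
      unfold csL; rw [PySem.List.getD_map_range _ _ _ _ (by omega)]
    rw [hcs]
    have hcol : Cfun S T i (j + 1) = Cfun S T i j + colS S T i j := Cfun_col S T j i
    have hrun : PySem.Int.mod (Cfun S T i j % 1000000007 + colS S T i j % 1000000007) MODC
        = Cfun S T i (j + 1) % 1000000007 := by
      rw [modc_eq, hcol]
      generalize Cfun S T i j = a
      generalize colS S T i j = b
      omega
    by_cases h : S.getD i 0 = T.getD j 0
    · rw [if_pos h]
      have hec : PySem.Int.mod (Cfun S T i j % 1000000007 + 1) MODC = ecT S T i j % 1000000007 := by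
        rw [modc_eq, ecT, if_pos h]
        generalize Cfun S T i j = a
        omega
      have hset : PySem.List.pySetD (rowEcL S T m i j) ((j : Nat) : Int) (ecT S T i j % 1000000007)
          = rowEcL S T m i (j + 1) := by
        rw [PySem.List.pySetD_natCast]
        unfold rowEcL
        rw [set_map_range]
        apply List.map_congr_left
        intro y hy
        by_cases hyj : y = j
        · subst hyj; rw [if_pos rfl, if_pos (by omega)]
        · rw [if_neg hyj]
          by_cases hyl : y < j
          · rw [if_pos hyl, if_pos (by omega)]
          · rw [if_neg hyl, if_neg (by omega)]
      have htot : PySem.Int.mod (pTot S T m i j % 1000000007 + ecT S T i j % 1000000007) MODC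
          = pTot S T m i (j + 1) % 1000000007 := by
        rw [modc_eq, pTot_succ]
        generalize pTot S T m i j = a
        generalize ecT S T i j = b
        omega
      rw [hec, hset, htot, hrun]
    · rw [if_neg h]
      have hec0 : ecT S T i j = 0 := if_neg h
      have hrow : rowEcL S T m i (j + 1) = rowEcL S T m i j := by
        unfold rowEcL
        apply List.map_congr_left
        intro y hy
        by_cases hyl : y < j
        · rw [if_pos (by omega), if_pos hyl]
        · by_cases hyj : y = j
          · subst hyj; rw [if_pos (by omega), if_neg hyl, hec0]; simp
          · rw [if_neg (by omega), if_neg hyl]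
      have hpt : pTot S T m i (j + 1) = pTot S T m i j := by
        rw [pTot_succ, hec0, add_zero]
      rw [hrun, hrow, hpt]

lemma csUpdB (S T : List Int) (m i : Nat) : ∀ j, j ≤ m →
    (PySem.List.pyRange 0 (↑j) 1).foldl
        (fun cs jj => PySem.List.pySetD cs jj
          (PySem.Int.mod (PySem.List.pyGetD cs jj 0 + PySem.List.pyGetD (rowEcL S T m i m) jj 0) MODC))
        (csL S T m i)
      = (List.range m).map (fun j' =>
          if j' < j then colS S T (i + 1) j' % 1000000007 else colS S T i j' % 1000000007) := by
  intro j
  induction j with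
  | zero =>
    intro _
    rw [show PySem.List.pyRange 0 (((0 : Nat) : Nat) : Int) 1 = [] from
      PySem.List.pyRange_one_eq_nil (by omega)]
    simp only [List.foldl_nil]
    unfold csL
    apply List.map_congr_left
    intro y _
    rw [if_neg (by omega)]
  | succ j ih =>
    intro hj
    have e2 : (((j + 1 : Nat) : Nat) : Int) = ((j : Nat) : Int) + 1 := by push_cast; ring
    rw [e2, PySem.List.pyRange_one_succ_right (by positivity), List.foldl_append, ih (by omega)]
    simp only [List.foldl_cons, List.foldl_nil, PySem.List.pyGetD_natCast, PySem.List.pySetD_natCast]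
    have h1 : ((List.range m).map (fun j' =>
        if j' < j then colS S T (i + 1) j' % 1000000007 else colS S T i j' % 1000000007)).getD j 0
        = colS S T i j % 1000000007 := by
      rw [PySem.List.getD_map_range _ _ _ _ (by omega), if_neg (by omega)]
    have h2 : (rowEcL S T m i m).getD j 0 = ecT S T i j % 1000000007 := by
      unfold rowEcL
      rw [PySem.List.getD_map_range _ _ _ _ (by omega), if_pos (by omega)]
    rw [h1, h2]
    have hval : PySem.Int.mod (colS S T i j % 1000000007 + ecT S T i j % 1000000007) MODC
        = colS S T (i + 1) j % 1000000007 := by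
      rw [modc_eq, colS_succ]
      generalize colS S T i j = a
      generalize ecT S T i j = b
      omega
    rw [hval, set_map_range]
    apply List.map_congr_left
    intro y hy
    by_cases hyj : y = j
    · subst hyj; rw [if_pos rfl, if_pos (by omega)]
    · rw [if_neg hyj]
      by_cases hyl : y < j
      · rw [if_pos hyl, if_pos (by omega)]
      · rw [if_neg hyl, if_neg (by omega)]

lemma rowB (S T : List Int) (m i : Nat) :
    altRow S T (↑m) (csL S T m i, Cfun S T i m % 1000000007) (↑i)
      = (csL S T m (i + 1), Cfun S T (i + 1) m % 1000000007) := by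
  unfold altRow
  have hinit : PySem.List.pyRepeat [(0 : Int)] ((m : Nat) : Int) = rowEcL S T m i 0 := by
    rw [PySem.List.pyRepeat_singleton, rowEcL_zero]
    simp
  simp only [hinit]
  rw [innerB S T m i m (le_refl m)]
  simp only
  rw [csUpdB S T m i m (le_refl m)]
  have hcs : (List.range m).map (fun j' =>
      if j' < m then colS S T (i + 1) j' % 1000000007 else colS S T i j' % 1000000007)
      = csL S T m (i + 1) := by
    unfold csL
    apply List.map_congr_left
    intro y hy
    simp only [List.mem_range] at hy
    rw [if_pos hy]
  have htot : pTot S T m i m = Cfun S T (i + 1) m := (Cfun_row S T i m).symm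
  rw [hcs, htot]

lemma outerB (S T : List Int) (m : Nat) : ∀ i : Nat,
    (PySem.List.pyRange 0 (↑i) 1).foldl (altRow S T (↑m)) (csL S T m 0, 0)
      = (csL S T m i, Cfun S T i m % 1000000007) := by
  intro i
  induction i with
  | zero =>
    rw [show PySem.List.pyRange 0 (((0 : Nat) : Nat) : Int) 1 = [] from
      PySem.List.pyRange_one_eq_nil (by omega)]
    rw [Cfun_zero_left]
    rfl
  | succ i ih =>
    have e1 : (((i + 1 : Nat) : Nat) : Int) = ((i : Nat) : Int) + 1 := by push_cast; ring
    rw [e1, PySem.List.pyRange_one_succ_right (by positivity), List.foldl_append, ih]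
    simp only [List.foldl_cons, List.foldl_nil]
    exact rowB S T m i

lemma solveB_eq (S T : List Int) (n m : Nat) :
    solve_alt (↑n) (↑m) S T = (Cfun S T n m % 1000000007 + 1) % 1000000007 := by
  simp only [solve_alt]
  have hinit : PySem.List.pyRepeat [(0 : Int)] ((m : Nat) : Int) = csL S T m 0 := by
    rw [PySem.List.pyRepeat_singleton, csL_zero]
    simp
  rw [hinit, outerB S T m n]
  rw [modc_eq]

-- ===== VERDICT (by name: the statement is the Claim_ definition above) =====
theorem solve_spec : Claim_equal_solve := by
  intro N M S T _ hPre
  obtain ⟨hN, hM, -⟩ := hPre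
  unfold Spec_solve
  have hN' : N = ((N.toNat : Nat) : Int) := (Int.toNat_of_nonneg hN).symm
  have hM' : M = ((M.toNat : Nat) : Int) := (Int.toNat_of_nonneg hM).symm
  rw [hN', hM', solveA_eq, solveB_eq]
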